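-- pv_equiv track=rewrite | github.com/daniel-reich/ubiquitous-fiesta | xFme9FBuvHLveh5nE_11.py | is_zygodrome
-- ===== SOURCE A (Python) =====
-- def is_zygodrome(num):
--   numStr = str(num)
--   if num < 2:
--     return False
--   for i in range(0,len(numStr)):
--     if i > 0:
--       if numStr[i] == numStr[i-1]:
--         continue
--     if i < len(numStr) - 1:
--       if numStr[i] == numStr[i+1]:
--         continue
--     return False
--   return True
-- ===== SOURCE B (Python) =====
-- def is_zygodrome(num):
--     # Run-length pass: every maximal run of equal digits must have length >= 2.
--     if num < 2:
--         return False
--     s = str(num)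
--     run = 1
--     for prev, cur in zip(s, s[1:]):
--         if cur == prev:
--             run += 1
--         else:
--             if run < 2:
--                 return False
--             run = 1
--     return run >= 2
-- ===== Notes on version B (the rewrite author's own statement) =====
-- stated objective: alternative
-- what changed: A tests each character against its left/right neighbours by index; B makes a single run-length pass over adjacent pairs, requiring every maximal run of equal digits to have length at least 2.
import Mathlib
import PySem

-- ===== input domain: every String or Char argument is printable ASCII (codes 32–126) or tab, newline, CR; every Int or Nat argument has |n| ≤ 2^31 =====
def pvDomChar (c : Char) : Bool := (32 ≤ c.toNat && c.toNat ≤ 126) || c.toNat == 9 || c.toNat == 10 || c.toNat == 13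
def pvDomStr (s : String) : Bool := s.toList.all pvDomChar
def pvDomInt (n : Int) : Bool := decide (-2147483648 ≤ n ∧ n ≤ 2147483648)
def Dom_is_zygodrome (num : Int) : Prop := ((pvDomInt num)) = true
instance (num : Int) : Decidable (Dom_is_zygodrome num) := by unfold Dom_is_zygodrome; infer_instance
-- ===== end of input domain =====

-- B replaces A's per-index left/right-neighbour test by a single run-length pass over
-- adjacent pairs (every maximal run of equal digits must have length ≥ 2); same cost.

-- ===== PORT A =====
-- A's for-loop over range(0, len(numStr)) with continue/early-return, as index recursion.
def is_zygodrome_loop (s : List Char) (i : Nat) : Bool :=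
  if _h : i < s.length then
    if 0 < i ∧ PySem.List.pyGet? s (i : Int) = PySem.List.pyGet? s ((i : Int) - 1) then
      is_zygodrome_loop s (i + 1)
    else if i < s.length - 1 ∧ PySem.List.pyGet? s (i : Int) = PySem.List.pyGet? s ((i : Int) + 1) then
      is_zygodrome_loop s (i + 1)
    else
      false
  else
    true
termination_by s.length - i

def is_zygodrome (num : Int) : Bool :=
  let numStr := (PySem.Int.toStr num).toList
  if num < 2 then
    false
  else
    is_zygodrome_loop numStr 0

-- ===== PORT B =====
-- B's for-loop over zip(s, s[1:]) carrying the current run length.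
def is_zygodrome_alt_loop (run : Nat) (ps : List (Char × Char)) : Bool :=
  match ps with
  | [] => decide (2 ≤ run)
  | (prev, cur) :: t =>
    if cur = prev then is_zygodrome_alt_loop (run + 1) t
    else if run < 2 then false
    else is_zygodrome_alt_loop 1 t

def is_zygodrome_alt (num : Int) : Bool :=
  if num < 2 then
    false
  else
    let s := (PySem.Int.toStr num).toList
    is_zygodrome_alt_loop 1 (s.zip (PySem.List.slice s (some 1) none))

-- ===== PRECONDITION & SPEC =====
def Spec_is_zygodrome (num : Int) (out : Bool) : Prop := out = is_zygodrome_alt num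
instance (num : Int) (out : Bool) : Decidable (Spec_is_zygodrome num out) := by unfold Spec_is_zygodrome; infer_instance

-- ===== CLAIM (what is proved, stated in full; the proofs are below) =====
def Claim_equal_is_zygodrome : Prop := ∀ (num : Int), Dom_is_zygodrome num → Spec_is_zygodrome num (is_zygodrome num)

-- ===== LEMMAS AND PROOFS =====

-- "Memoryless" form of A's per-position condition: with previous char c,
-- every char of l must equal its left or right neighbour.
def chkA : Char → List Char → Bool
  | _, [] => true
  | c, x :: t => ((x == c) || (t.head? == some x)) && chkA x t

-- One-bit-memory form shared by both sides: sat = "previous char c already matched ITS left neighbour".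
def chk : Bool → Char → List Char → Bool
  | sat, _, [] => sat
  | sat, c, x :: t => if x = c then chk true x t else sat && chk false x t

theorem chkA_eq_chk (t : List Char) :
    (∀ c, chkA c t = chk true c t) ∧
    (∀ x, ((t.head? == some x) && chkA x t) = chk false x t) := by
  induction t with
  | nil => simp [chkA, chk]
  | cons y t' ih =>
    constructor
    · intro c
      by_cases h : y = c
      · subst h
        simp [chkA, chk, ih.1 y]
      · have hb : (y == c) = false := by simp [h]
        simp [chkA, chk, h, hb, ← ih.2 y]
    · intro x
      by_cases h : y = x
      · subst h
        simp [chkA, chk, ih.1 y]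
      · simp [chkA, chk, h]

theorem aLoop_eq_chkA (t : List Char) :
    ∀ (pre : List Char) (c : Char),
      is_zygodrome_loop (pre ++ c :: t) (pre.length + 1) = chkA c t := by
  induction t with
  | nil =>
    intro pre c
    rw [is_zygodrome_loop]
    simp [chkA]
  | cons x t' ih =>
    intro pre c
    have hx : PySem.List.pyGet? (pre ++ c :: x :: t') ((pre.length : Int) + 1) = some x := by
      have : ((pre.length : Int) + 1) = ((pre.length + 1 : Nat) : Int) := by push_cast; ring
      rw [this, PySem.List.pyGet?_natCast]
      simp
    rw [is_zygodrome_loop]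
    by_cases hxc : x = c
    · subst hxc
      have := ih (pre ++ [x]) x
      simp at this
      simp [hx, chkA, this]
    · -- x ≠ c: A falls to the forward test
      cases t' with
      | nil =>
        rw [dif_pos (by simp)]
        rw [if_neg (by push_cast; simp [hx]; intro h; exact hxc h)]
        rw [if_neg (by simp)]
        simp [chkA, hxc]
      | cons y t'' =>
        have hy : PySem.List.pyGet? (pre ++ c :: x :: y :: t'') ((pre.length : Int) + 1 + 1) = some y := by
          have : ((pre.length : Int) + 1 + 1) = ((pre.length + 2 : Nat) : Int) := by push_cast; ring
          rw [this, PySem.List.pyGet?_natCast]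
          simp
        rw [dif_pos (by simp)]
        rw [if_neg (by push_cast; simp [hx]; intro h; exact hxc h)]
        by_cases hxy : x = y
        · subst hxy
          rw [if_pos (by push_cast; exact ⟨by simp, by rw [hx, hy]⟩)]
          have := ih (pre ++ [c]) x
          simp at this
          rw [show pre.length + 1 + 1 = pre.length + 2 by omega, this]
          simp [chkA]
        · rw [if_neg (by push_cast; simp [hx, hy]; intro h; exact hxy h)]
          simp [chkA, hxc, Ne.symm hxy]

theorem aLoop_zero_eq_chk (x : Char) (t : List Char) :
    is_zygodrome_loop (x :: t) 0 = chk false x t := by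
  rw [is_zygodrome_loop]
  rw [dif_pos (by simp)]
  rw [if_neg (by simp)]
  cases t with
  | nil =>
    rw [if_neg (by simp)]
    simp [chk]
  | cons y t' =>
    have hx : PySem.List.pyGet? (x :: y :: t') (((0 : Nat) : Int)) = some x := by
      rw [PySem.List.pyGet?_natCast]
      simp
    have hy : PySem.List.pyGet? (x :: y :: t') (((0 : Nat) : Int) + 1) = some y := by
      have : ((0 : Nat) : Int) + 1 = ((1 : Nat) : Int) := by norm_num
      rw [this, PySem.List.pyGet?_natCast]
      simp
    by_cases hxy : y = x
    · subst hxy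
      rw [if_pos (And.intro (by simp) (by rw [hx, hy]))]
      have := aLoop_eq_chkA (y :: t') [] y
      simp at this
      rw [this]
      simp [chkA, chk, (chkA_eq_chk t').1 y]
    · rw [if_neg (by intro hcond; apply hxy; have h2 := hcond.2; rw [hx, hy] at h2; exact (Option.some_inj.mp h2).symm)]
      simp [chk, hxy]

theorem bLoop_eq_chk (t : List Char) :
    ∀ (c : Char) (run : Nat), 1 ≤ run →
      is_zygodrome_alt_loop run ((c :: t).zip t) = chk (decide (2 ≤ run)) c t := by
  induction t with
  | nil => intro c run _; simp [is_zygodrome_alt_loop, chk]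
  | cons y t' ih =>
    intro c run hrun
    simp only [List.zip_cons_cons, is_zygodrome_alt_loop]
    by_cases h : y = c
    · rw [if_pos h]
      rw [ih y (run + 1) (by omega)]
      simp [chk, h, show 2 ≤ run + 1 by omega]
    · rw [if_neg h]
      by_cases h2 : run < 2
      · rw [if_pos h2]
        simp [chk, h, show ¬ (2 ≤ run) by omega]
      · rw [if_neg h2]
        rw [ih y 1 (by omega)]
        simp [chk, h, show 2 ≤ run by omega]

-- ===== VERDICT (by name: the statement is the Claim_ definition above) =====
theorem is_zygodrome_spec : Claim_equal_is_zygodrome := by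
  intro num _
  unfold Spec_is_zygodrome is_zygodrome is_zygodrome_alt
  by_cases h : num < 2
  · simp [h]
  · simp only [h, if_false]
    have hne : (PySem.Int.toStr num).toList ≠ [] := by
      rw [PySem.Int.toList_toStr]
      unfold PySem.Int.toChars
      split
      · simp
      · have : 0 < (Nat.toDigits 10 num.toNat).length := Nat.length_toDigits_pos
        intro hnil
        rw [hnil] at this
        simp at this
    obtain ⟨x, t, hxt⟩ := List.exists_cons_of_ne_nil hne
    rw [hxt]
    rw [PySem.List.slice_from_one]
    show is_zygodrome_loop (x :: t) 0 = is_zygodrome_alt_loop 1 ((x :: t).zip t)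
    rw [aLoop_zero_eq_chk, bLoop_eq_chk t x 1 (by omega)]
    simp
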